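-- pv_equiv track=rewrite | github.com/jakesearle/symmetric-hyperbolic-crochet | util.py | grid_str
-- ===== SOURCE A (Python) =====
-- BOX_HORIZONTAL = "─"
--
-- BOX_VERTICAL = "│"
--
-- BOX_VERTICAL_AND_HORIZONTAL = "┼"
--
-- def grid_str(values):
--     string_values = [[str(cell) for cell in row] for row in values]
--     rotated = zip(*string_values)
--     column_widths = [max([max([len(w) for w in cell.split('\n')] + [0]) for cell in col]) for col in rotated]
--     row_heights = [max([max([len(cell.split('\n'))]) for cell in row] + [0]) for row in string_values]
--     string_builder = ''
--     for i, row in enumerate(string_values):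
--         # Fill extra row things
--         sub_rows = [['' for _ in row] for _ in range(row_heights[i])]
--         for i2, cell in enumerate(row):
--             sub_cells = cell.split('\n')
--             for j2, s_cell in enumerate(sub_cells):
--                 sub_rows[j2][i2] = s_cell
--         string_builder += '\n'.join([get_row_text(sub_row, column_widths) for sub_row in sub_rows]) + '\n'
--         if i != len(string_values) - 1:
--             string_builder += get_divider(column_widths) + '\n'
--     return string_builder
--
-- def get_row_text(row, widths):
--     return ' ' + f' {BOX_VERTICAL} '.join([cell.center(col_width) for cell, col_width in zip(row, widths)]) + ' '
--
-- def get_divider(widths):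
--     return BOX_HORIZONTAL + f'{BOX_HORIZONTAL}{BOX_VERTICAL_AND_HORIZONTAL}{BOX_HORIZONTAL}'.join(
--         [BOX_HORIZONTAL * w for w in widths]) + BOX_HORIZONTAL
-- ===== SOURCE B (Python) =====
-- BOX_HORIZONTAL = "─"
--
-- BOX_VERTICAL = "│"
--
-- BOX_VERTICAL_AND_HORIZONTAL = "┼"
--
--
-- def grid_str(values):
--     rows = [[str(cell) for cell in row] for row in values]
--     ncols = min((len(r) for r in rows), default=0)
--     widths = [max(len(r[j]) for r in rows) for j in range(ncols)]
--     divider = BOX_HORIZONTAL + f'{BOX_HORIZONTAL}{BOX_VERTICAL_AND_HORIZONTAL}{BOX_HORIZONTAL}'.join(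
--         BOX_HORIZONTAL * w for w in widths) + BOX_HORIZONTAL
--
--     def block(r):
--         # a row's text block: one centered line per row with cells, none for an empty row
--         if not r:
--             return ''
--         return ' ' + f' {BOX_VERTICAL} '.join(r[j].center(widths[j]) for j in range(ncols)) + ' '
--
--     return ('\n' + divider + '\n').join(block(r) for r in rows) + ('\n' if rows else '')
-- ===== Notes on version B (the rewrite author's own statement) =====
-- stated objective: simpler
-- what changed: B drops A's multi-line cell machinery (splitting every cell on '\n', the row_heights array, the sub_rows matrix filled cell-by-cell by index assignment, and string accumulation with conditional divider appends): since cells are str(int) and always one line, B renders one text block per row (empty for an empty row) and joins the blocks with '\n'+divider+'\n' as a separator, computing column widths by index instead of via zip(*rows).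
import Mathlib
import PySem

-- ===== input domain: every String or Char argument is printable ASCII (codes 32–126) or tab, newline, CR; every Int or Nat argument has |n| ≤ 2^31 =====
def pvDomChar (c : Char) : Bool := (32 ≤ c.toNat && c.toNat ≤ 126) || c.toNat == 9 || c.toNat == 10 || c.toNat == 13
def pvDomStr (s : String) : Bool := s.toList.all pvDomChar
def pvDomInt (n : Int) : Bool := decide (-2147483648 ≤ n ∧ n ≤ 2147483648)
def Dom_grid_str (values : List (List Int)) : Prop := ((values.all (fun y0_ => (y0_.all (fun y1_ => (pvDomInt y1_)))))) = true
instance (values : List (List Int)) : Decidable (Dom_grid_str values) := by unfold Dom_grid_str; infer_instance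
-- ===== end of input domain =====

-- B replaces A's per-row sub-row matrix machinery (split cells, row_heights, cell-by-cell
-- index assignment, string accumulation with conditional divider appends) by rendering one text
-- block per row and joining the blocks with '\n'+divider+'\n' as a separator (objective:
-- simpler; a timing run also measured B faster by a constant factor).

-- ===== shared Python primitives =====

/-- Python's `s.center(width)` with the default fill `' '` (CPython's padding rule:
    `marg = width - len(s)`, `left = marg // 2 + (marg & width & 1)`), on code points. -/
def pyCenter (cs : List Char) (w : Nat) : List Char :=
  if w ≤ cs.length then cs
  else
    let marg := w - cs.length
    let left := marg / 2 + (marg &&& w &&& 1)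
    List.replicate left ' ' ++ cs ++ List.replicate (marg - left) ' '

/-- Python's `max(xs)` / `max(xs + [0])` on a list of naturals as used below
    (every use site is a list of naturals that is nonempty or carries an explicit `+ [0]`,
    so `foldl max 0` is exact). -/
def pyMaxNat (xs : List Nat) : Nat := xs.foldl max 0

/-- `zip(*rows)` (helper of `pyZip`): truncating transpose, step for step —
    take the heads of all rows while every row is nonempty. -/
def pyZipGo {α : Type} : List α → List (List α) → List (List α)
  | [], _ => []
  | a :: r', rs =>
    match rs.mapM List.head? with
    | some t => (a :: t) :: pyZipGo r' (rs.map List.tail)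
    | none => []

/-- Python's `zip(*rows)` as a list of columns. -/
def pyZip {α : Type} : List (List α) → List (List α)
  | [] => []
  | r :: rs => pyZipGo r rs

-- ===== PORT A =====
-- (Python locals become the named helper definitions pvStringValues/pvColumnWidths/… .)

/-- `get_row_text(row, widths)`. -/
def get_row_text (row : List (List Char)) (widths : List Nat) : List Char :=
  [' '] ++ PySem.Chars.join " │ ".toList ((row.zip widths).map (fun p => pyCenter p.1 p.2)) ++ [' ']

/-- `get_divider(widths)` (`BOX_HORIZONTAL * w` = `List.replicate w '─'`). -/
def get_divider (widths : List Nat) : List Char :=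
  ['─'] ++ PySem.Chars.join "─┼─".toList (widths.map (fun w => List.replicate w '─')) ++ ['─']

/-- `string_values = [[str(cell) for cell in row] for row in values]` -/
def pvStringValues (values : List (List Int)) : List (List (List Char)) :=
  values.map (fun row => row.map (fun cell => PySem.Int.toChars cell))

/-- `column_widths = [max([max([len(w) for w in cell.split('\n')] + [0]) for cell in col]) for col in rotated]` -/
def pvColumnWidths (sv : List (List (List Char))) : List Nat :=
  (pyZip sv).map (fun col =>
    pyMaxNat (col.map (fun cell =>
      pyMaxNat (((PySem.Chars.splitOn cell ['\n']).map (fun w => w.length)) ++ [0]))))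

/-- `row_heights = [max([max([len(cell.split('\n'))]) for cell in row] + [0]) for row in string_values]` -/
def pvRowHeights (sv : List (List (List Char))) : List Nat :=
  sv.map (fun row =>
    pyMaxNat ((row.map (fun cell => pyMaxNat [(PySem.Chars.splitOn cell ['\n']).length])) ++ [0]))

/-- `sub_rows = [['' for _ in row] for _ in range(row_heights[i])]` -/
def pvSubRows0 (h : Nat) (row : List (List Char)) : List (List (List Char)) :=
  (List.range h).map (fun _ => row.map (fun _ => ([] : List Char)))

/-- the cell-by-cell fill loop (`sub_rows[j2][i2] = s_cell`; always in range in Python,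
    `pySetD` is that in-range write). -/
def pvFillSubRows (row : List (List Char)) (sub : List (List (List Char))) : List (List (List Char)) :=
  (PySem.List.enumerate row).foldl (fun sub_rows i2Cell =>
    (PySem.List.enumerate (PySem.Chars.splitOn i2Cell.2 ['\n'])).foldl (fun sub_rows j2Cell =>
      PySem.List.pySetD sub_rows j2Cell.1
        (PySem.List.pySetD (PySem.List.pyGetD sub_rows j2Cell.1 []) i2Cell.1 j2Cell.2))
      sub_rows) sub

/-- the body of A's `for i, row in enumerate(string_values)` loop. -/
def pvBuildRow (cw : List Nat) (rh : List Nat) (nRows : Nat)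
    (sb : List Char) (p : Int × List (List Char)) : List Char :=
  let sub_rows := pvFillSubRows p.2 (pvSubRows0 (PySem.List.pyGetD rh p.1 0) p.2)
  let sb := sb ++
    PySem.Chars.join ['\n'] (sub_rows.map (fun sub_row => get_row_text sub_row cw)) ++ ['\n']
  if p.1 ≠ (nRows : Int) - 1 then sb ++ get_divider cw ++ ['\n'] else sb

def grid_str (values : List (List Int)) : String :=
  String.ofList ((PySem.List.enumerate (pvStringValues values)).foldl
    (pvBuildRow (pvColumnWidths (pvStringValues values))
      (pvRowHeights (pvStringValues values)) (pvStringValues values).length) [])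

-- ===== PORT B =====
-- (Source B's locals rows/ncols/widths/divider/lines, as the helper definitions pvRows/… .)

/-- `rows = [[str(cell) for cell in row] for row in values]` -/
def pvRows (values : List (List Int)) : List (List (List Char)) :=
  values.map (fun row => row.map (fun cell => PySem.Int.toChars cell))

/-- `ncols = min((len(r) for r in rows), default=0)` -/
def pvNcols (rows : List (List (List Char))) : Nat :=
  PySem.List.minD (rows.map List.length) (fun x => x) 0

/-- `widths = [max(len(r[j]) for r in rows) for j in range(ncols)]` — that max is over a
    nonempty list of naturals whenever it is evaluated (j < ncols forces rows ≠ []),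
    so `pyMaxNat` is exact; `r.getD j [] = r[j]` since `j < ncols ≤ len(r)`. -/
def pvWidths (rows : List (List (List Char))) : List Nat :=
  (List.range (pvNcols rows)).map (fun j => pyMaxNat (rows.map (fun r => (r.getD j []).length)))

/-- the divider literal of Source B (same formula as A's `get_divider`). -/
def pvDivider (widths : List Nat) : List Char :=
  ['─'] ++ PySem.Chars.join "─┼─".toList (widths.map (fun w => List.replicate w '─')) ++ ['─']

/-- `block(r)`: a row's text block — one centered line per row with cells, none (the empty
    string) for an empty row. -/
def pvBlock (ncols : Nat) (widths : List Nat) (r : List (List Char)) : List Char :=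
  if r = [] then []
  else [' '] ++ PySem.Chars.join " │ ".toList
    ((List.range ncols).map (fun j => pyCenter (r.getD j []) (widths.getD j 0))) ++ [' ']

def grid_str_alt (values : List (List Int)) : String :=
  String.ofList
    (PySem.Chars.join (['\n'] ++ pvDivider (pvWidths (pvRows values)) ++ ['\n'])
        ((pvRows values).map (pvBlock (pvNcols (pvRows values)) (pvWidths (pvRows values)))) ++
      (if (pvRows values).isEmpty then [] else ['\n']))

-- ===== PRECONDITION & SPEC =====

def Spec_grid_str (values : List (List Int)) (out : String) : Prop := out = grid_str_alt values
instance (values : List (List Int)) (out : String) : Decidable (Spec_grid_str values out) := by unfold Spec_grid_str; infer_instance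

-- ===== CLAIM (what is proved, stated in full; the proofs are below) =====
def Claim_equal_grid_str : Prop := ∀ (values : List (List Int)), Dom_grid_str values → Spec_grid_str values (grid_str values)

-- ===== LEMMAS AND PROOFS =====

lemma splitOn_go_no_sep : ∀ (fuel : Nat) (l cur : List Char) (acc : List (List Char)),
    '\n' ∉ l →
    PySem.Chars.splitOn.go ['\n'] fuel l cur acc = ((cur.reverse ++ l) :: acc).reverse := by
  intro fuel
  induction fuel with
  | zero => intro l cur acc h; rfl
  | succ f ih =>
    intro l cur acc h
    cases l with
    | nil => simp [PySem.Chars.splitOn.go]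
    | cons c rest =>
      have hc : c ≠ '\n' := fun hcc => h (by simp [hcc])
      rw [PySem.Chars.splitOn.go]
      have : List.isPrefixOf ['\n'] (c :: rest) = false := by
        simp [List.isPrefixOf]; exact fun hcc => absurd hcc.symm hc
      rw [this]
      simp only [Bool.false_eq_true, if_false]
      rw [ih rest (c :: cur) acc (fun hm => h (by simp [hm]))]
      simp

/-- splitting on a separator that does not occur returns the whole string -/
lemma splitOn_nl_of_not_mem (cs : List Char) (h : '\n' ∉ cs) :
    PySem.Chars.splitOn cs ['\n'] = [cs] := by
  unfold PySem.Chars.splitOn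
  rw [splitOn_go_no_sep _ _ _ _ h]
  simp

lemma digitChar_ne_nl (m : Nat) (h : m < 10) : Nat.digitChar m ≠ '\n' := by
  interval_cases m <;> decide

lemma toDigitsCore_no_nl : ∀ (fuel n : Nat) (acc : List Char), '\n' ∉ acc →
    '\n' ∉ Nat.toDigitsCore 10 fuel n acc := by
  intro fuel
  induction fuel with
  | zero => intro n acc h; simpa [Nat.toDigitsCore] using h
  | succ f ih =>
    intro n acc h
    rw [Nat.toDigitsCore]
    have hd : '\n' ∉ (Nat.digitChar (n % 10) :: acc) := by
      intro hm
      rcases List.mem_cons.1 hm with hm | hm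
      · exact digitChar_ne_nl (n % 10) (Nat.mod_lt _ (by norm_num)) hm.symm
      · exact h hm
    split
    · exact hd
    · exact ih _ _ hd

/-- `str(n)` contains no newline. -/
lemma nl_not_mem_toChars (n : Int) : '\n' ∉ PySem.Int.toChars n := by
  unfold PySem.Int.toChars Nat.toDigits
  split
  · intro hm
    rcases List.mem_cons.1 hm with hm | hm
    · exact absurd hm.symm (by decide)
    · exact toDigitsCore_no_nl _ _ [] (by simp) hm
  · exact toDigitsCore_no_nl _ _ [] (by simp)

lemma nl_not_mem_getD (vr : List Int) (j : Nat) :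
    '\n' ∉ (vr.map PySem.Int.toChars).getD j [] := by
  by_cases hj : j < vr.length
  · rw [List.getD_eq_getElem _ _ (by simpa using hj)]
    simp only [List.getElem_map]
    exact nl_not_mem_toChars _
  · rw [List.getD_eq_default _ _ (by simpa using hj)]
    simp

lemma foldl_min_len_le_init {α : Type} (rs : List (List α)) (a : Nat) :
    rs.foldl (fun a l => min a l.length) a ≤ a := by
  induction rs generalizing a with
  | nil => simp
  | cons r t ih => exact le_trans (ih (min a r.length)) (min_le_left _ _)

lemma foldl_min_len_le_mem {α : Type} (rs : List (List α)) (a : Nat) (l : List α) (h : l ∈ rs) :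
    rs.foldl (fun a l => min a l.length) a ≤ l.length := by
  induction rs generalizing a with
  | nil => simp at h
  | cons r t ih =>
    rcases List.mem_cons.1 h with rfl | h
    · exact le_trans (foldl_min_len_le_init t (min a l.length)) (min_le_right _ _)
    · exact ih _ h

lemma pyMaxNat_ones' : ∀ {α : Type} (l : List α),
    ((l.map fun _ => (1 : Nat)) ++ [0]).foldl max 1 = 1 := by
  intro α l; induction l with
  | nil => simp
  | cons x t ih => simpa using ih

lemma pyMaxNat_ones {α : Type} (l : List α) (h : l ≠ []) :
    pyMaxNat ((l.map fun _ => (1 : Nat)) ++ [0]) = 1 := by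
  cases l with
  | nil => simp at h
  | cons x t => simpa [pyMaxNat] using pyMaxNat_ones' t

/-- zip against a shorter list of widths, by index -/
lemma zip_eq_range_map (ws : List Nat) (r : List (List Char)) (h : ws.length ≤ r.length) :
    r.zip ws = (List.range ws.length).map (fun j => (r.getD j [], ws.getD j 0)) := by
  induction ws generalizing r with
  | nil => simp
  | cons w t ih =>
    cases r with
    | nil => simp at h
    | cons c r' =>
      simp only [List.zip_cons_cons, List.length_cons, List.range_succ_eq_map, List.map_cons,
        List.map_map]
      refine congrArg₂ _ rfl ?_
      rw [ih r' (by simpa using h)]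
      simp

/-- membership in enumerate -/
lemma mem_enumerate {α : Type} : ∀ (xs : List α) (s : Int) (p : Int × α),
    p ∈ PySem.List.enumerate xs s →
    ∃ j : Nat, j < xs.length ∧ p.1 = s + j ∧ p.2 = xs.getD j p.2 := by
  intro xs
  induction xs with
  | nil => intro s p h; simp [PySem.List.enumerate] at h
  | cons x t ih =>
    intro s p h
    simp only [PySem.List.enumerate] at h
    rcases List.mem_cons.1 h with rfl | h
    · exact ⟨0, by simp⟩
    · obtain ⟨j, hj, h1, h2⟩ := ih (s+1) p h
      exact ⟨j+1, by simpa using hj, by push_cast; omega, by simpa using h2⟩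

lemma mapM_head?_none {α : Type} : ∀ (rs : List (List α)), rs.mapM List.head? = none →
    ∃ l ∈ rs, l = [] := by
  intro rs
  induction rs with
  | nil => intro h; simp at h
  | cons l t ih =>
    intro h
    cases hl : l with
    | nil => exact ⟨[], by simp⟩
    | cons x xs =>
      subst hl
      simp only [List.mapM_cons, List.head?_cons] at h
      cases ht : t.mapM List.head? with
      | none => obtain ⟨l', hl', he⟩ := ih ht; exact ⟨l', by simp [hl'], he⟩
      | some u => rw [ht] at h; simp at h

lemma mapM_head?_some {α : Type} (d : α) : ∀ (rs : List (List α)) (t : List α),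
    rs.mapM List.head? = some t → (∀ l ∈ rs, l ≠ []) ∧ t = rs.map (fun l => l.getD 0 d) := by
  intro rs
  induction rs with
  | nil => intro t h; simp at h; simp [← h]
  | cons l rest ih =>
    intro t h
    cases l with
    | nil => simp [List.mapM_cons] at h
    | cons x xs =>
      simp only [List.mapM_cons, List.head?_cons] at h
      cases ht : rest.mapM List.head? with
      | none => rw [ht] at h; simp at h
      | some u =>
        rw [ht] at h
        simp at h
        obtain ⟨h1, h2⟩ := ih u ht
        constructor
        · intro l' hl'
          rcases List.mem_cons.1 hl' with rfl | hl'
          · simp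
          · exact h1 _ hl'
        · rw [← h]
          simp [h2]

lemma foldl_min_len_shift {α : Type} : ∀ (rs : List (List α)) (k : Nat), (∀ l ∈ rs, l ≠ []) →
    rs.foldl (fun a l => min a l.length) (k + 1)
      = (rs.map List.tail).foldl (fun a l => min a l.length) k + 1 := by
  intro rs
  induction rs with
  | nil => intro k _; simp
  | cons l t ih =>
    intro k h
    have hl : l ≠ [] := h l (by simp)
    have hlen : l.length = l.tail.length + 1 := by
      cases l with | nil => simp at hl | cons x xs => simp
    simp only [List.foldl_cons, List.map_cons]
    rw [hlen, Nat.succ_min_succ, ih (min k l.tail.length) (fun l' hl' => h l' (by simp [hl']))]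

/-- the truncating transpose, columnwise -/
lemma pyZipGo_spec {α : Type} (d : α) :
    ∀ (r : List α) (rs : List (List α)),
      pyZipGo r rs = (List.range (rs.foldl (fun a l => min a l.length) r.length)).map
        (fun j => r.getD j d :: rs.map (fun l => l.getD j d)) := by
  intro r
  induction r with
  | nil =>
    intro rs
    have h0 : rs.foldl (fun a l => min a l.length) 0 = 0 :=
      Nat.le_zero.1 (foldl_min_len_le_init rs 0)
    simp [pyZipGo, h0]
  | cons a r' ih =>
    intro rs
    rw [pyZipGo]
    cases h : rs.mapM List.head? with
    | none =>
      obtain ⟨l, hl, rfl⟩ := mapM_head?_none rs h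
      have h0 : rs.foldl (fun a' l' => min a' l'.length) (r'.length + 1) = 0 := by
        have := foldl_min_len_le_mem rs (r'.length + 1) [] hl
        simpa using this
      simp only [List.length_cons, h0, List.range_zero, List.map_nil]
    | some t =>
      obtain ⟨h1, h2⟩ := mapM_head?_some d rs t h
      have hshift := foldl_min_len_shift rs r'.length h1
      simp only [List.length_cons] at *
      rw [hshift, List.range_succ_eq_map, List.map_cons, List.map_map]
      refine congrArg₂ _ ?_ ?_
      · simp [h2]
      · rw [ih (rs.map List.tail)]
        refine List.map_congr_left (fun j _ => ?_)
        simp [Function.comp]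

/-- A's cell-by-cell fill of a height-1 sub-row matrix writes the row back -/
lemma fill_single_row (r : List (List Char)) :
    ∀ (s : Nat) (l : List (List Char)), s + r.length ≤ l.length →
      (PySem.List.enumerate r (s : Int)).foldl
          (fun sr p => PySem.List.pySetD sr 0
            (PySem.List.pySetD (PySem.List.pyGetD sr 0 []) p.1 p.2)) [l]
        = [l.take s ++ r ++ l.drop (s + r.length)] := by
  induction r with
  | nil =>
    intro s l h
    show [l] = _
    simp
  | cons c rest ih =>
    intro s l h
    have hcons : PySem.List.enumerate (c :: rest) (s : Int)
        = ((s : Int), c) :: PySem.List.enumerate rest ((s : Int) + 1) := rfl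
    rw [hcons, List.foldl_cons]
    have hs : s < l.length := by simp at h; omega
    have hstep : PySem.List.pySetD [l] 0
        (PySem.List.pySetD (PySem.List.pyGetD [l] 0 []) (s : Int) c) = [l.set s c] := by
      rw [PySem.List.pyGetD_zero_cons, PySem.List.pySetD_natCast,
        PySem.List.pySetD_of_nonneg _ _ (by norm_num)]
      simp
    rw [hstep]
    have hcast : ((s : Int) + 1) = ((s + 1 : Nat) : Int) := by push_cast; ring
    rw [hcast, ih (s + 1) (l.set s c) (by simp at h ⊢; omega)]
    have hset : l.set s c = l.take s ++ c :: l.drop (s + 1) :=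
      by rw [List.set_eq_take_append_cons_drop]; simp [hs]
    rw [hset]
    congr 1
    rw [List.take_append, List.drop_append]
    have hlt : (l.take s).length = s := by simp; omega
    rw [List.take_of_length_le (by omega), hlt]
    rw [List.drop_of_length_le (l := l.take s) (by omega)]
    have h1 : s + 1 - s = 1 := by omega
    have h2 : s + 1 + rest.length - s = 1 + rest.length := by omega
    rw [h1, h2]
    have h3 : s + (c :: rest).length = s + 1 + rest.length := by simp; omega
    rw [h3]
    have h4 : (1:Nat) + rest.length = rest.length + 1 := by omega
    rw [h4, List.drop_succ_cons, List.drop_drop]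
    simp

/-- A's builder loop is B's separator join -/
lemma builder_loop_eq_join (line : List (List Char) → List Char) (div : List Char) (n : Nat) :
    ∀ (l : List (List (List Char))) (k : Nat) (acc : List Char), l ≠ [] → k + l.length = n →
      (PySem.List.enumerate l (k : Int)).foldl
          (fun sb p => if p.1 ≠ (n : Int) - 1 then sb ++ line p.2 ++ ['\n'] ++ div ++ ['\n']
                       else sb ++ line p.2 ++ ['\n']) acc
        = acc ++ PySem.Chars.join (['\n'] ++ div ++ ['\n']) (l.map line) ++ ['\n'] := by
  intro l
  induction l with
  | nil => intro k acc h; exact absurd rfl h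
  | cons x t ih =>
    intro k acc _ hn
    have hcons : PySem.List.enumerate (x :: t) (k : Int)
        = ((k : Int), x) :: PySem.List.enumerate t ((k : Int) + 1) := rfl
    rw [hcons, List.foldl_cons]
    cases t with
    | nil =>
      have hk : (k : Int) = (n : Int) - 1 := by simp at hn; omega
      simp only [hk, ne_eq, not_true_eq_false, if_false]
      show acc ++ line x ++ ['\n'] = _
      rw [List.map_cons, List.map_nil, PySem.Chars.join_singleton]
    | cons y t' =>
      have hk : ((k : Int) ≠ (n : Int) - 1) := by simp at hn; omega
      rw [if_pos hk]
      have hcast : ((k : Int) + 1) = ((k + 1 : Nat) : Int) := by push_cast; ring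
      rw [hcast, ih (k + 1) _ (by simp) (by simp at hn ⊢; omega)]
      rw [show List.map line (x :: y :: t') = line x :: line y :: List.map line t' from rfl,
        PySem.Chars.join_cons_cons]
      simp

lemma cellWidth_eq (c : List Char) (h : '\n' ∉ c) :
    pyMaxNat ((PySem.Chars.splitOn c ['\n']).map (fun w => w.length) ++ [0]) = c.length := by
  rw [splitOn_nl_of_not_mem c h]
  simp [pyMaxNat]

/-- the two width computations agree -/
lemma widths_eq (sv : List (List (List Char)))
    (hnl : ∀ r ∈ sv, ∀ j : Nat, '\n' ∉ r.getD j []) :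
    pvColumnWidths sv = pvWidths sv := by
  cases sv with
  | nil => rfl
  | cons r0 rs =>
    unfold pvColumnWidths pvWidths pvNcols
    rw [show pyZip (r0 :: rs) = pyZipGo r0 rs from rfl, pyZipGo_spec ([] : List Char)]
    have hn : PySem.List.minD ((r0 :: rs).map List.length) (fun x => x) 0
        = rs.foldl (fun a l => min a l.length) r0.length := by
      rw [List.map_cons]
      unfold PySem.List.minD
      rw [PySem.List.min?_id_cons]
      simp [List.foldl_map]
    rw [hn, List.map_map]
    refine List.map_congr_left (fun j _ => ?_)
    simp only [Function.comp_apply, List.map_cons, List.map_map]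
    refine congrArg pyMaxNat ?_
    refine congrArg₂ _ (cellWidth_eq _ (hnl r0 (by simp) j)) ?_
    exact List.map_congr_left (fun l hl => cellWidth_eq _ (hnl l (by simp [hl]) j))

lemma height_eq (r : List (List Char)) (h : ∀ c ∈ r, '\n' ∉ c) :
    pyMaxNat ((r.map (fun cell => pyMaxNat [(PySem.Chars.splitOn cell ['\n']).length])) ++ [0])
      = if r = [] then 0 else 1 := by
  have hmap : r.map (fun cell => pyMaxNat [(PySem.Chars.splitOn cell ['\n']).length])
      = r.map (fun _ => 1) :=
    List.map_congr_left (fun c hc => by rw [splitOn_nl_of_not_mem c (h c hc)]; simp [pyMaxNat])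
  rw [hmap]
  by_cases hr : r = []
  · simp [hr, pyMaxNat]
  · rw [if_neg hr]
    exact pyMaxNat_ones r hr

/-- the row heights: 1 for a row with cells, 0 for an empty row -/
lemma heights_eq (sv : List (List (List Char)))
    (hcells : ∀ r ∈ sv, ∀ c ∈ r, '\n' ∉ c) :
    pvRowHeights sv = sv.map (fun r => if r = [] then 0 else 1) := by
  unfold pvRowHeights
  exact List.map_congr_left (fun r hr => height_eq r (hcells r hr))


/-- a row's rendered text in A equals its block in B -/
lemma block_eq (sv : List (List (List Char))) (r : List (List Char)) (hr : r ∈ sv) :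
    (if r = [] then [] else get_row_text r (pvWidths sv))
      = pvBlock (pvNcols sv) (pvWidths sv) r := by
  by_cases hre : r = []
  · simp [hre, pvBlock]
  rw [if_neg hre]
  unfold get_row_text pvBlock
  rw [if_neg hre]
  have hlen : (pvWidths sv).length = pvNcols sv := by simp [pvWidths]
  have hle : pvNcols sv ≤ r.length := by
    cases sv with
    | nil => simp at hr
    | cons r0 rs =>
      have hn : pvNcols (r0 :: rs) = rs.foldl (fun a l => min a l.length) r0.length := by
        unfold pvNcols
        rw [List.map_cons]
        unfold PySem.List.minD
        rw [PySem.List.min?_id_cons]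
        simp [List.foldl_map]
      rw [hn]
      rcases List.mem_cons.1 hr with rfl | hr
      · exact foldl_min_len_le_init rs r.length
      · exact foldl_min_len_le_mem rs r0.length r hr
  rw [zip_eq_range_map _ _ (by omega), hlen, List.map_map]
  rfl

-- ===== VERDICT (by name: the statement is the Claim_ definition above) =====
theorem grid_str_spec : Claim_equal_grid_str := by
  intro values _
  show grid_str values = grid_str_alt values
  have hsv : pvStringValues values = pvRows values := rfl
  cases values with
  | nil => rfl
  | cons v vs =>
    unfold grid_str grid_str_alt
    rw [hsv]
    -- facts about the rows
    have hcells : ∀ r ∈ pvRows (v :: vs), ∀ c ∈ r, '\n' ∉ c := by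
      intro r hr c hc
      obtain ⟨vr, _, rfl⟩ := List.mem_map.1 hr
      obtain ⟨x, _, rfl⟩ := List.mem_map.1 hc
      exact nl_not_mem_toChars x
    have hnl : ∀ r ∈ pvRows (v :: vs), ∀ j : Nat, '\n' ∉ r.getD j [] := by
      intro r hr j
      obtain ⟨vr, _, rfl⟩ := List.mem_map.1 hr
      exact nl_not_mem_getD vr j
    have hW := widths_eq (pvRows (v :: vs)) hnl
    have hH := heights_eq (pvRows (v :: vs)) hcells
    rw [hW, hH]
    -- rewrite A's loop body into the clean builder shape
    have hbody : ∀ (sb : List Char) (p : Int × List (List Char)),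
        p ∈ PySem.List.enumerate (pvRows (v :: vs)) →
        pvBuildRow (pvWidths (pvRows (v :: vs)))
            ((pvRows (v :: vs)).map (fun r => if r = [] then 0 else 1))
            (pvRows (v :: vs)).length sb p
          = (if p.1 ≠ ((pvRows (v :: vs)).length : Int) - 1
             then sb ++ (if p.2 = [] then []
                         else get_row_text p.2 (pvWidths (pvRows (v :: vs)))) ++ ['\n']
                  ++ get_divider (pvWidths (pvRows (v :: vs))) ++ ['\n']
             else sb ++ (if p.2 = [] then []
                         else get_row_text p.2 (pvWidths (pvRows (v :: vs)))) ++ ['\n']) := by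
      intro sb p hp
      obtain ⟨j, hj, hp1, hp2⟩ := mem_enumerate _ _ _ hp
      have hpmem : p.2 ∈ pvRows (v :: vs) := by
        rw [hp2, List.getD_eq_getElem _ _ (by simpa using hj)]
        exact List.getElem_mem _
      unfold pvBuildRow
      have hidx : PySem.List.pyGetD
          ((pvRows (v :: vs)).map (fun r => if r = [] then 0 else 1)) p.1 0
          = if p.2 = [] then 0 else 1 := by
        rw [hp1, show (0 : Int) + (j : Int) = (j : Int) by ring, PySem.List.pyGetD_natCast,
          List.getD_eq_getElem _ _ (by simpa using hj), List.getElem_map]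
        have : (pvRows (v :: vs))[j] = p.2 := by
          conv_rhs => rw [hp2, List.getD_eq_getElem _ _ (by simpa using hj)]
        rw [this]
      rw [hidx]
      by_cases hpe : p.2 = []
      · -- an empty row: zero sub-rows, the joined row text is empty
        rw [if_pos hpe, hpe]
        show (if p.1 ≠ ((pvRows (v :: vs)).length : Int) - 1
              then sb ++ PySem.Chars.join ['\n']
                    ((pvFillSubRows [] (pvSubRows0 0 [])).map
                      (fun sub_row => get_row_text sub_row (pvWidths (pvRows (v :: vs))))) ++ ['\n']
                  ++ get_divider (pvWidths (pvRows (v :: vs))) ++ ['\n']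
              else sb ++ PySem.Chars.join ['\n']
                    ((pvFillSubRows [] (pvSubRows0 0 [])).map
                      (fun sub_row => get_row_text sub_row (pvWidths (pvRows (v :: vs))))) ++ ['\n']) = _
        have hfe : pvFillSubRows [] (pvSubRows0 0 []) = [] := rfl
        rw [hfe]
        simp
      · -- a row with cells: one sub-row, filled back to the row itself
        rw [if_neg hpe]
        have hsub0 : pvSubRows0 1 p.2 = [p.2.map (fun _ => ([] : List Char))] := by
          simp [pvSubRows0]
        rw [hsub0]
        have hfill : pvFillSubRows p.2 [p.2.map (fun _ => ([] : List Char))] = [p.2] := by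
          unfold pvFillSubRows
          have hconv : ∀ (sr : List (List (List Char))) (q : Int × List Char),
              q ∈ PySem.List.enumerate p.2 →
              (PySem.List.enumerate (PySem.Chars.splitOn q.2 ['\n'])).foldl
                (fun sub_rows j2Cell =>
                  PySem.List.pySetD sub_rows j2Cell.1
                    (PySem.List.pySetD (PySem.List.pyGetD sub_rows j2Cell.1 []) q.1 j2Cell.2))
                sr
              = PySem.List.pySetD sr 0
                  (PySem.List.pySetD (PySem.List.pyGetD sr 0 []) q.1 q.2) := by
            intro sr q hq
            obtain ⟨j2, hj2, _, hq2⟩ := mem_enumerate _ _ _ hq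
            have hqmem : q.2 ∈ p.2 := by
              rw [hq2, List.getD_eq_getElem _ _ (by simpa using hj2)]
              exact List.getElem_mem _
            rw [splitOn_nl_of_not_mem q.2 (hcells p.2 hpmem q.2 hqmem)]
            rfl
          rw [PySem.List.foldl_congr_mem _ _ _ _ hconv]
          have := fill_single_row p.2 0 (p.2.map (fun _ => ([] : List Char))) (by simp)
          rw [show ((0 : Nat) : Int) = (0 : Int) from rfl] at this
          rw [this]
          simp
        rw [hfill]
        simp only [List.map_cons, List.map_nil, PySem.Chars.join_singleton, if_neg hpe]
    rw [PySem.List.foldl_congr_mem _ _ _ _ hbody]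
    have hmain := builder_loop_eq_join
      (fun row => if row = [] then [] else get_row_text row (pvWidths (pvRows (v :: vs))))
      (get_divider (pvWidths (pvRows (v :: vs))))
      (pvRows (v :: vs)).length (pvRows (v :: vs)) 0 [] (by simp [pvRows]) (by simp)
    rw [show ((0 : Nat) : Int) = (0 : Int) from rfl] at hmain
    rw [hmain]
    have hlines : (pvRows (v :: vs)).map
          (fun row => if row = [] then [] else get_row_text row (pvWidths (pvRows (v :: vs))))
        = (pvRows (v :: vs)).map
          (pvBlock (pvNcols (pvRows (v :: vs))) (pvWidths (pvRows (v :: vs)))) :=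
      List.map_congr_left (fun r hr => block_eq _ r hr)
    rw [hlines]
    have hdiv : get_divider = pvDivider := rfl
    rw [hdiv]
    have hempty : (pvRows (v :: vs)).isEmpty = false := by simp [pvRows]
    rw [hempty]
    simp
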